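-- pv_equiv track=rewrite | github.com/notnikhilreddy/AI-Informer | v2/main.py | deduplicate_news_list
-- ===== SOURCE A (Python) =====
-- def deduplicate_news_list(urls, keywords):
--     # deduplicate the urls and keywords based on urls
--     urls_dict = {}
--     for i in range(len(urls)):
--         if urls[i] not in urls_dict:
--             urls_dict[urls[i]] = keywords[i]
--         else:
--             urls_dict[urls[i]] = urls_dict[urls[i]] + ', ' + keywords[i]
--
--     urls = list(urls_dict.keys())
--     keywords = list(urls_dict.values())
--     return urls, keywords
-- ===== SOURCE B (Python) =====
-- def deduplicate_news_list(urls, keywords):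
--     # dedup-then-gather: build the unique urls in first-occurrence order (no dict),
--     # then for each unique url scan the index range and collect its keywords
--     unique = []
--     for u in urls:
--         if u not in unique:
--             unique.append(u)
--     merged = []
--     for u in unique:
--         parts = []
--         for i in range(len(urls)):
--             if urls[i] == u:
--                 parts.append(keywords[i])
--         merged.append(', '.join(parts))
--     return unique, merged
-- ===== Notes on version B (the rewrite author's own statement) =====
-- stated objective: alternative
-- what changed: B uses no dictionary at all: it first builds the list of unique urls in first-occurrence order, then for each unique url gathers its keywords by scanning the index range and joins them once, instead of A's single pass that maintains a dict of growing concatenated strings.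
import Mathlib
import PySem

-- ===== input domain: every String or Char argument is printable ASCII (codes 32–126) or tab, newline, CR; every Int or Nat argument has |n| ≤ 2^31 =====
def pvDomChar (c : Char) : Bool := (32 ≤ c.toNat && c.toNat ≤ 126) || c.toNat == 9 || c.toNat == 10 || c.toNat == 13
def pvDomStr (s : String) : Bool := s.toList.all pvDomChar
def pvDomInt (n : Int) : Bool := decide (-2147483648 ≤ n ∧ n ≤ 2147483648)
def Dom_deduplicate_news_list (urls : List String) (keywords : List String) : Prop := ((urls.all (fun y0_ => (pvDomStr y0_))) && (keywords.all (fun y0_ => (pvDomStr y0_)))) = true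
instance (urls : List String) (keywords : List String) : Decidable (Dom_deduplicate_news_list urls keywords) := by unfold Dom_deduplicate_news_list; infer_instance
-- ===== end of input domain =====

-- B re-solves the task without any dictionary: unique urls in first-occurrence
-- order, then a gather-and-join scan per unique url (alternative decomposition).

-- ===== PORT A =====
-- literal port of A: one pass, dict mapping url -> running ', '-concatenated string
def deduplicate_news_list (urls : List String) (keywords : List String) : List String × List String :=
  let d := (PySem.List.pyRange 0 (urls.length : Int)).foldl
    (fun d i =>
      if d.contains (PySem.List.pyGetD urls i "") = false then
        d.insert (PySem.List.pyGetD urls i "") (PySem.List.pyGetD keywords i "")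
      else
        d.insert (PySem.List.pyGetD urls i "")
          (d.getD (PySem.List.pyGetD urls i "") "" ++ ", " ++ PySem.List.pyGetD keywords i ""))
    (PySem.Dict.empty : PySem.Dict String String)
  (d.keys, d.values)

-- ===== PORT B =====
-- literal port of B: dedup loop over urls, then per unique url an index-scan
-- accumulating the matching keywords, joined once
def deduplicate_news_list_alt (urls : List String) (keywords : List String) : List String × List String :=
  let unique := urls.foldl (fun s u => if u ∈ s then s else s ++ [u]) []
  let merged := unique.map (fun u =>
    PySem.Str.join ", "
      ((PySem.List.pyRange 0 (urls.length : Int)).foldl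
        (fun ps i => if PySem.List.pyGetD urls i "" == u then ps ++ [PySem.List.pyGetD keywords i ""] else ps) []))
  (unique, merged)

-- ===== PRECONDITION & SPEC =====
-- Pre_ excludes only the inputs where Python A raises IndexError (keywords shorter than urls).
def Pre_deduplicate_news_list (urls : List String) (keywords : List String) : Prop :=
  urls.length ≤ keywords.length
instance (urls : List String) (keywords : List String) : Decidable (Pre_deduplicate_news_list urls keywords) := by unfold Pre_deduplicate_news_list; infer_instance

def pvWitness_deduplicate_news_list : List String × List String :=
  (["a", "b", "a"], ["x", "y", "z"])

def Spec_deduplicate_news_list (urls : List String) (keywords : List String) (out : List String × List String) : Prop := out = deduplicate_news_list_alt urls keywords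
instance (urls : List String) (keywords : List String) (out : List String × List String) : Decidable (Spec_deduplicate_news_list urls keywords out) := by unfold Spec_deduplicate_news_list; infer_instance

-- ===== CLAIM (what is proved, stated in full; the proofs are below) =====
def Claim_equal_deduplicate_news_list : Prop := ∀ (urls : List String) (keywords : List String), Dom_deduplicate_news_list urls keywords → Pre_deduplicate_news_list urls keywords → Spec_deduplicate_news_list urls keywords (deduplicate_news_list urls keywords)

-- ===== LEMMAS AND PROOFS =====

def pvJoin (vs : List String) : String := PySem.Str.join ", " vs

-- B's dedup accumulator
def pvSeen (xs : List String) : List String :=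
  xs.foldl (fun s u => if u ∈ s then s else s ++ [u]) []

-- the keywords gathered for url u over the first n indices
def pvGrp (urls keywords : List String) (n : Nat) (u : String) : List String :=
  ((PySem.List.pyRange 0 (n : Int)).filter
    (fun i => PySem.List.pyGetD urls i "" == u)).map
    (fun i => PySem.List.pyGetD keywords i "")

theorem pvJoin_singleton (k : String) : pvJoin [k] = k := by
  simp [pvJoin, PySem.Str.join, PySem.Chars.join, List.intercalate]

theorem pvCharsJoin_append (sep q : List Char) : ∀ (p : List Char) (ps : List (List Char)),
    PySem.Chars.join sep (p :: (ps ++ [q])) = PySem.Chars.join sep (p :: ps) ++ sep ++ q := by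
  intro p ps
  induction ps generalizing p with
  | nil =>
      rw [List.nil_append, PySem.Chars.join_cons_cons, PySem.Chars.join_singleton,
        PySem.Chars.join_singleton]
  | cons r ps ih =>
      rw [List.cons_append, PySem.Chars.join_cons_cons, ih r, PySem.Chars.join_cons_cons]
      simp [List.append_assoc]

theorem pvJoin_append (vs : List String) (k : String) (h : vs ≠ []) :
    pvJoin (vs ++ [k]) = pvJoin vs ++ ", " ++ k := by
  obtain ⟨v, vs, rfl⟩ := List.exists_cons_of_ne_nil h
  unfold pvJoin
  simp only [PySem.Str.join, List.cons_append, List.map_cons, List.map_append, List.map_nil]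
  rw [pvCharsJoin_append, String.ofList_append, String.ofList_append,
    String.ofList_toList, String.ofList_toList]

theorem pvSeen_mem_aux (xs : List String) : ∀ (s : List String) (u : String),
    u ∈ xs.foldl (fun s u => if u ∈ s then s else s ++ [u]) s ↔ u ∈ s ∨ u ∈ xs := by
  induction xs with
  | nil => intro s u; simp
  | cons x xs ih =>
      intro s u
      simp only [List.foldl_cons, ih, List.mem_cons]
      split_ifs with hx
      · constructor
        · rintro (h | h)
          · exact Or.inl h
          · exact Or.inr (Or.inr h)
        · rintro (h | h | h)
          · exact Or.inl h
          · exact Or.inl (h ▸ hx)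
          · exact Or.inr h
      · simp only [List.mem_append, List.mem_singleton]
        tauto

theorem pvSeen_mem (xs : List String) (u : String) : u ∈ pvSeen xs ↔ u ∈ xs := by
  unfold pvSeen; rw [pvSeen_mem_aux]; simp

theorem pvSeen_nodup_aux (xs : List String) : ∀ (s : List String), s.Nodup →
    (xs.foldl (fun s u => if u ∈ s then s else s ++ [u]) s).Nodup := by
  induction xs with
  | nil => intro s hs; exact hs
  | cons x xs ih =>
      intro s hs
      simp only [List.foldl_cons]
      split_ifs with hx
      · exact ih s hs
      · refine ih _ ?_
        rw [List.nodup_append]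
        refine ⟨hs, List.nodup_singleton x, ?_⟩
        intro a ha b hb
        rw [List.mem_singleton] at hb
        subst hb
        exact fun he => hx (he ▸ ha)

theorem pvSeen_nodup (xs : List String) : (pvSeen xs).Nodup :=
  pvSeen_nodup_aux xs [] List.nodup_nil

theorem pvSeen_concat (xs : List String) (x : String) :
    pvSeen (xs ++ [x]) = if x ∈ pvSeen xs then pvSeen xs else pvSeen xs ++ [x] := by
  unfold pvSeen; rw [List.foldl_append]; rfl

theorem pvGrp_succ (urls keywords : List String) (n : Nat) (u : String) :
    pvGrp urls keywords (n + 1) u =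
      pvGrp urls keywords n u ++
        (if PySem.List.pyGetD urls (n : Int) "" == u
         then [PySem.List.pyGetD keywords (n : Int) ""] else []) := by
  unfold pvGrp
  rw [show ((n + 1 : Nat) : Int) = (n : Int) + 1 by push_cast; ring,
    PySem.List.pyRange_one_succ_right (by positivity), List.filter_append, List.map_append]
  congr 1
  by_cases h : (PySem.List.pyGetD urls (n : Int) "" == u) = true
  · simp only [List.filter_cons, List.filter_nil, h, if_true, List.map_cons, List.map_nil]
  · rw [Bool.not_eq_true] at h
    simp only [List.filter_cons, List.filter_nil, h, Bool.false_eq_true, if_false, List.map_nil]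

theorem pvGrp_nil (urls keywords : List String) (n : Nat) (hn : n ≤ urls.length)
    (u : String) (hu : u ∉ urls.take n) : pvGrp urls keywords n u = [] := by
  unfold pvGrp
  rw [List.map_eq_nil_iff, List.filter_eq_nil_iff]
  intro i hi
  rw [PySem.List.mem_pyRange_one] at hi
  obtain ⟨h0, hn'⟩ := hi
  obtain ⟨k, rfl⟩ : ∃ k : Nat, (k : Int) = i := ⟨i.toNat, Int.toNat_of_nonneg h0⟩
  have hk : k < n := by exact_mod_cast hn'
  have hkl : k < urls.length := lt_of_lt_of_le hk hn
  rw [PySem.List.pyGetD_natCast, List.getD_eq_getElem urls "" hkl]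
  simp only [beq_iff_eq]
  intro he
  exact hu (he ▸ List.mem_take_iff_getElem.mpr ⟨k, by omega, by simp⟩)

-- invariant for A's fold: items = B's unique list of the prefix, paired with joined groups
theorem pvInv (urls keywords : List String) : ∀ n, n ≤ urls.length →
    (((PySem.List.pyRange 0 (n : Int)).foldl
      (fun d i =>
        if d.contains (PySem.List.pyGetD urls i "") = false then
          d.insert (PySem.List.pyGetD urls i "") (PySem.List.pyGetD keywords i "")
        else
          d.insert (PySem.List.pyGetD urls i "")
            (d.getD (PySem.List.pyGetD urls i "") "" ++ ", " ++ PySem.List.pyGetD keywords i ""))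
      (PySem.Dict.empty : PySem.Dict String String)).items
      = (pvSeen (urls.take n)).map (fun u => (u, pvJoin (pvGrp urls keywords n u))))
    ∧ ∀ u ∈ pvSeen (urls.take n), pvGrp urls keywords n u ≠ [] := by
  intro n
  induction n with
  | zero =>
      intro _
      rw [show ((0 : Nat) : Int) = 0 from rfl, PySem.List.pyRange_one_eq_nil le_rfl]
      exact ⟨by simp [PySem.Dict.empty, pvSeen], by simp [pvSeen]⟩
  | succ n ih =>
      intro hn1
      have hn : n ≤ urls.length := Nat.le_of_succ_le hn1
      have hnl : n < urls.length := hn1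
      obtain ⟨hitems, hne⟩ := ih hn
      set dA := ((PySem.List.pyRange 0 (n : Int)).foldl
        (fun d i =>
          if d.contains (PySem.List.pyGetD urls i "") = false then
            d.insert (PySem.List.pyGetD urls i "") (PySem.List.pyGetD keywords i "")
          else
            d.insert (PySem.List.pyGetD urls i "")
              (d.getD (PySem.List.pyGetD urls i "") "" ++ ", " ++ PySem.List.pyGetD keywords i ""))
        (PySem.Dict.empty : PySem.Dict String String)) with hdA
      have hkeys : dA.keys = pvSeen (urls.take n) := by
        simp only [PySem.Dict.keys, hitems, List.map_map]
        simp [Function.comp_def]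
      have hknd : dA.keys.Nodup := by rw [hkeys]; exact pvSeen_nodup _
      have hun : PySem.List.pyGetD urls (n : Int) "" = urls[n] := by
        rw [PySem.List.pyGetD_natCast]; exact List.getD_eq_getElem urls "" hnl
      have htake : urls.take (n + 1) = urls.take n ++ [urls[n]] := by
        rw [List.take_succ, List.getElem?_eq_getElem hnl]; rfl
      have hcont : dA.contains (PySem.List.pyGetD urls (n : Int) "")
          = decide (urls[n] ∈ pvSeen (urls.take n)) := by
        rw [hun, PySem.Dict.contains_eq_decide_mem_keys, hkeys]
      rw [show ((n + 1 : Nat) : Int) = (n : Int) + 1 by push_cast; ring,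
        PySem.List.pyRange_one_succ_right (by positivity), List.foldl_append,
        List.foldl_cons, List.foldl_nil, ← hdA]
      by_cases hmem : urls[n] ∈ pvSeen (urls.take n)
      · -- repeated url: dict entry updated in place, unique list unchanged
        have hmemT : urls[n] ∈ urls.take n := (pvSeen_mem _ _).mp hmem
        have hseen1 : pvSeen (urls.take (n + 1)) = pvSeen (urls.take n) := by
          rw [htake, pvSeen_concat, if_pos hmem]
        rw [if_neg (by rw [hcont]; simp [hmem])]
        have hgA : dA.getD urls[n] "" = pvJoin (pvGrp urls keywords n urls[n]) :=
          PySem.Dict.getD_of_mem_items dA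
            (by rw [hitems]; exact List.mem_map.mpr ⟨urls[n], hmem, rfl⟩) hknd ""
        constructor
        · rw [PySem.Dict.items_insert_of_contains dA _ (by rw [hcont]; simp [hmem]),
            hitems, List.map_map, hseen1]
          refine List.map_congr_left (fun u hu => ?_)
          by_cases huu : u = urls[n]
          · simp only [Function.comp_apply, huu, hun, beq_self_eq_true, if_true]
            rw [hgA, pvGrp_succ, hun, if_pos (by simp), ← pvJoin_append _ _ (hne _ hmem)]
          · have : (u == PySem.List.pyGetD urls (n : Int) "") = false := by
              rw [hun]; simpa using huu
            simp only [Function.comp_apply, this, if_neg, Bool.false_eq_true,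
              not_false_eq_true, if_false]
            rw [pvGrp_succ, hun, if_neg (by simpa using fun h => huu h.symm),
              List.append_nil]
        · intro u hu
          rw [hseen1] at hu
          rw [pvGrp_succ]
          intro hcontra
          exact hne u hu (List.append_eq_nil_iff.mp hcontra).1
      · -- new url: appended to the dict and to the unique list
        have hnotT : urls[n] ∉ urls.take n := fun h => hmem ((pvSeen_mem _ _).mpr h)
        have hseen1 : pvSeen (urls.take (n + 1)) = pvSeen (urls.take n) ++ [urls[n]] := by
          rw [htake, pvSeen_concat, if_neg hmem]
        rw [if_pos (by rw [hcont]; simp [hmem])]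
        have hgrpn : pvGrp urls keywords n urls[n] = [] := pvGrp_nil urls keywords n hn _ hnotT
        constructor
        · rw [PySem.Dict.items_insert_of_not_contains dA (PySem.List.pyGetD keywords (n : Int) "")
            (by rw [hcont]; simp [hmem]), hitems, hseen1, List.map_append]
          congr 1
          · refine List.map_congr_left (fun u hu => ?_)
            have huu : u ≠ urls[n] := fun h => hmem (h ▸ hu)
            rw [pvGrp_succ, hun, if_neg (by simpa using fun h => huu h.symm), List.append_nil]
          · rw [List.map_singleton, pvGrp_succ, hgrpn, List.nil_append, hun,
              if_pos (by simp), pvJoin_singleton]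
        · intro u hu
          rw [hseen1, List.mem_append, List.mem_singleton] at hu
          rcases hu with hu | rfl
          · rw [pvGrp_succ]
            intro hcontra
            exact hne u hu (List.append_eq_nil_iff.mp hcontra).1
          · rw [pvGrp_succ, hgrpn, List.nil_append, hun, if_pos (by simp)]
            simp

-- B's inner gather loop is exactly pvGrp at full length
theorem pvGather_eq (urls keywords : List String) (u : String) :
    (PySem.List.pyRange 0 (urls.length : Int)).foldl
      (fun ps i => if PySem.List.pyGetD urls i "" == u
        then ps ++ [PySem.List.pyGetD keywords i ""] else ps) []
    = pvGrp urls keywords urls.length u := by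
  unfold pvGrp
  rw [PySem.List.foldl_append_if]
  rfl

-- ===== VERDICT (by name: the statement is the Claim_ definition above) =====
theorem deduplicate_news_list_spec : Claim_equal_deduplicate_news_list := by
  intro urls keywords _ _
  unfold Spec_deduplicate_news_list deduplicate_news_list deduplicate_news_list_alt
  obtain ⟨hitems, -⟩ := pvInv urls keywords urls.length le_rfl
  rw [List.take_length] at hitems
  refine Prod.ext ?_ ?_
  · show _ = _
    simp only [PySem.Dict.keys, hitems, List.map_map]
    simp [Function.comp_def, pvSeen]
  · show _ = _
    simp only [PySem.Dict.values, hitems, List.map_map]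
    refine List.map_congr_left (fun u hu => ?_)
    simp only [Function.comp_apply]
    rw [pvGather_eq]
    rfl
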